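-- pv_equiv track=rewrite | github.com/AnkithKommanapalli/PID_Controller_nutnutbot | Ramp/validation_PID_ramp.py | remove_spikes
-- ===== SOURCE A (Python) =====
-- def remove_spikes(data, threshold):
--     if not data: return data
--     clean_data = [data[0]]
--     for i in range(1, len(data)):
--         # If the speed jumps by more than the threshold, repeat the last good value
--         if abs(data[i] - clean_data[-1]) > threshold:
--             clean_data.append(clean_data[-1])
--         else:
--             clean_data.append(data[i])
--     return clean_data
-- ===== SOURCE B (Python) =====
-- def remove_spikes(data, threshold):
--     if not data:
--         return data
--     # pass 1: keep only the accepted (non-spike) samples, with their positions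
--     keep = [(0, data[0])]
--     for i, x in enumerate(data):
--         if i and abs(x - keep[-1][1]) <= threshold:
--             keep.append((i, x))
--     # pass 2: forward-fill: repeat each kept value up to the next kept position
--     out = []
--     for (i, v), (j, _) in zip(keep, keep[1:]):
--         out += [v] * (j - i)
--     li, lv = keep[-1]
--     out += [lv] * (len(data) - li)
--     return out
-- ===== Notes on version B (the rewrite author's own statement) =====
-- stated objective: alternative
-- what changed: Two staged passes instead of one element-wise loop: pass 1 builds a sparse list of the accepted (index, value) samples only, pass 2 reconstructs the output by forward-filling each kept value over the gap to the next kept index with list repetition.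
import Mathlib
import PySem

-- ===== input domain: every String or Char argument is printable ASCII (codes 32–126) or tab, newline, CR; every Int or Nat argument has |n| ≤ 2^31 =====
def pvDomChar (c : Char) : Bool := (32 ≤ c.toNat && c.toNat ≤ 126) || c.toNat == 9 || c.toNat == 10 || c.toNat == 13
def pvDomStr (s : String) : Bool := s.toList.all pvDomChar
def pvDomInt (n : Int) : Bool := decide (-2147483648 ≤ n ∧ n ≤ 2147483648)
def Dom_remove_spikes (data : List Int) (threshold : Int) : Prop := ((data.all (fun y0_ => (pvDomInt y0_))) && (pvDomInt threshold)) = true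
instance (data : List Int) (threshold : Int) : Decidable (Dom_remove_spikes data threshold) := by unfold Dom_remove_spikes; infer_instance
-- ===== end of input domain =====

-- B replaces A's element-wise loop by two staged passes: pass 1 keeps only the accepted
-- (index, value) samples, pass 2 forward-fills each kept value over the gap to the next
-- kept index; return values are proved equal (alternative decomposition, same cost).

-- ===== PORT A =====
-- literal transliteration of A: indexed loop over range(1, len(data)), appending to
-- clean_data, reading clean_data[-1] and data[i] by (Python) indexing.
def remove_spikes (data : List Int) (threshold : Int) : List Int :=
  if data = [] then data
  else
    (PySem.List.pyRange 1 (PySem.List.len data) 1).foldl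
      (fun clean i =>
        if |PySem.List.pyGetD data i 0 - PySem.List.pyGetD clean (-1) 0| > threshold then
          clean ++ [PySem.List.pyGetD clean (-1) 0]
        else
          clean ++ [PySem.List.pyGetD data i 0])
      [PySem.List.pyGetD data 0 0]

-- ===== PORT B =====
-- transliteration of Source B: pass 1 folds over enumerate(data) collecting accepted (i, x)
-- pairs ('if i' = i ≠ 0, keep[-1][1] by Python indexing); pass 2 folds over
-- zip(keep, keep[1:]) (keep[1:] = keep.tail, exact for any list) extending the output with
-- [v] * (j - i), then appends [lv] * (len(data) - li) for the last kept pair.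
def remove_spikes_alt (data : List Int) (threshold : Int) : List Int :=
  match data with
  | [] => data
  | p :: _ =>
    let keep := (PySem.List.enumerate data).foldl
      (fun keep (ix : Int × Int) =>
        if ix.1 ≠ 0 ∧ |ix.2 - (PySem.List.pyGetD keep (-1) (0, 0)).2| ≤ threshold then
          keep ++ [ix]
        else keep)
      [((0 : Int), p)]
    let out := (keep.zip keep.tail).foldl
      (fun out ab => out ++ List.replicate (ab.2.1 - ab.1.1).toNat ab.1.2) []
    let last := PySem.List.pyGetD keep (-1) ((0 : Int), (0 : Int))
    out ++ List.replicate (PySem.List.len data - last.1).toNat last.2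

-- ===== PRECONDITION & SPEC =====
def Spec_remove_spikes (data : List Int) (threshold : Int) (out : List Int) : Prop := out = remove_spikes_alt data threshold
instance (data : List Int) (threshold : Int) (out : List Int) : Decidable (Spec_remove_spikes data threshold out) := by unfold Spec_remove_spikes; infer_instance

-- ===== CLAIM =====
def Claim_equal_remove_spikes : Prop := ∀ (data : List Int) (threshold : Int), Dom_remove_spikes data threshold → Spec_remove_spikes data threshold (remove_spikes data threshold)

-- ===== LEMMAS AND PROOFS =====

-- reference spine: the cleaned tail after a last-accepted value `prev`
def rsRef (th : Int) (prev : Int) : List Int → List Int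
  | [] => []
  | x :: t => if |x - prev| > th then prev :: rsRef th prev t else x :: rsRef th x t

-- reference pass 1: accepted pairs from a pair list, last accepted value `v0`
def kpRef (th : Int) (v0 : Int) : List (Int × Int) → List (Int × Int)
  | [] => []
  | ix :: t => if |ix.2 - v0| ≤ th then ix :: kpRef th ix.2 t else kpRef th v0 t

-- reference pass 2: forward-fill a nonempty kept list up to total length n
def expRef (n : Int) : List (Int × Int) → List Int
  | [] => []
  | [iv] => List.replicate (n - iv.1).toNat iv.2
  | iv :: jw :: ks => List.replicate (jw.1 - iv.1).toNat iv.2 ++ expRef n (jw :: ks)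

-- A's fold equals the reference spine appended to the accumulator
theorem rsA_fold (th : Int) (t : List Int) :
    ∀ (acc : List Int) (prev : Int), acc ≠ [] → acc.getLast? = some prev →
    t.foldl
      (fun clean x =>
        if |x - PySem.List.pyGetD clean (-1) 0| > th then
          clean ++ [PySem.List.pyGetD clean (-1) 0]
        else
          clean ++ [x])
      acc = acc ++ rsRef th prev t := by
  induction t with
  | nil => intro acc prev _ _; simp [rsRef]
  | cons x t ih =>
    intro acc prev hne hlast
    have hget : PySem.List.pyGetD acc (-1) 0 = prev := by
      rw [PySem.List.pyGetD_neg_one acc 0 hne]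
      rw [List.getLast?_eq_some_getLast hne] at hlast
      exact Option.some.inj hlast
    simp only [List.foldl_cons, hget, rsRef]
    by_cases h : |x - prev| > th
    · rw [if_pos h, if_pos h, ih (acc ++ [prev]) prev (by simp) (by simp)]
      simp
    · rw [if_neg h, if_neg h, ih (acc ++ [x]) x (by simp) (by simp)]
      simp

-- A computes the reference spine
theorem rsA (th p : Int) (rest : List Int) :
    remove_spikes (p :: rest) th = p :: rsRef th p rest := by
  unfold remove_spikes
  simp only [if_neg (List.cons_ne_nil p rest)]
  have hfold := PySem.List.foldl_pyRange_pyGetD (xs := p :: rest) (a := 1) (d := 0)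
    (f := fun clean x =>
      if |x - PySem.List.pyGetD clean (-1) 0| > th then
        clean ++ [PySem.List.pyGetD clean (-1) 0]
      else
        clean ++ [x])
    (init := [PySem.List.pyGetD (p :: rest) 0 0]) (by omega)
  simp only [PySem.List.pyGetD_zero_cons] at hfold ⊢
  rw [hfold]
  simpa using rsA_fold th rest [p] p (by simp) (by simp)

-- B's pass-1 fold equals the reference pass 1 appended to the accumulator
theorem kpB_fold (th : Int) (ps : List (Int × Int)) :
    ∀ (keep : List (Int × Int)) (iv : Int × Int),
    (∀ q ∈ ps, q.1 ≠ 0) → keep ≠ [] → keep.getLast? = some iv →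
    ps.foldl
      (fun keep (ix : Int × Int) =>
        if ix.1 ≠ 0 ∧ |ix.2 - (PySem.List.pyGetD keep (-1) (0, 0)).2| ≤ th then
          keep ++ [ix]
        else keep)
      keep = keep ++ kpRef th iv.2 ps := by
  induction ps with
  | nil => intro keep iv _ _ _; simp [kpRef]
  | cons ix t ih =>
    intro keep iv hnz hne hlast
    have hget : PySem.List.pyGetD keep (-1) (0, 0) = iv := by
      rw [PySem.List.pyGetD_neg_one keep (0, 0) hne]
      rw [List.getLast?_eq_some_getLast hne] at hlast
      exact Option.some.inj hlast
    have hix : ix.1 ≠ 0 := hnz ix (by simp)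
    simp only [List.foldl_cons, hget, kpRef]
    by_cases h : |ix.2 - iv.2| ≤ th
    · rw [if_pos ⟨hix, h⟩, if_pos h,
        ih (keep ++ [ix]) ix (fun q hq => hnz q (by simp [hq])) (by simp) (by simp)]
      simp
    · rw [if_neg (by tauto), if_neg h, ih keep iv (fun q hq => hnz q (by simp [hq])) hne hlast]

-- pass 1 over the enumerated tail, then forward-fill, equals the reference spine
theorem exp_kp (th : Int) (t : List Int) :
    ∀ (pos i0 v0 n : Int), i0 < pos → n = pos + t.length →
    expRef n ((i0, v0) :: kpRef th v0 (PySem.List.enumerate t pos)) =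
      List.replicate (pos - i0).toNat v0 ++ rsRef th v0 t := by
  induction t with
  | nil =>
    intro pos i0 v0 n h1 h2
    simp [PySem.List.enumerate_nil, kpRef, expRef, rsRef, h2]
  | cons x t ih =>
    intro pos i0 v0 n h1 h2
    rw [PySem.List.enumerate_cons]
    simp only [kpRef, rsRef]
    by_cases h : |x - v0| ≤ th
    · rw [if_pos h, if_neg (by omega)]
      show expRef n ((i0, v0) :: (pos, x) :: kpRef th x (PySem.List.enumerate t (pos + 1)))
        = _
      rw [expRef, ih (pos + 1) pos x n (by omega) (by simp at h2 ⊢; omega)]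
      have : (pos + 1 - pos).toNat = 1 := by omega
      simp
    · rw [if_neg h, if_pos (by omega),
        ih (pos + 1) i0 v0 n (by omega) (by simp at h2 ⊢; omega)]
      have hsucc : (pos + 1 - i0).toNat = (pos - i0).toNat + 1 := by omega
      rw [hsucc, List.replicate_succ']
      simp

-- the zip fold plus the final replicate equals the reference forward-fill
theorem exp_zip (n : Int) : ∀ (ks : List (Int × Int)), ks ≠ [] →
    (ks.zip ks.tail).foldl
      (fun out ab => out ++ List.replicate (ab.2.1 - ab.1.1).toNat ab.1.2) []
      ++ List.replicate (n - (PySem.List.pyGetD ks (-1) ((0 : Int), (0 : Int))).1).toNat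
          (PySem.List.pyGetD ks (-1) ((0 : Int), (0 : Int))).2
    = expRef n ks := by
  intro ks
  induction ks with
  | nil => intro h; exact absurd rfl h
  | cons a ks ih =>
    intro _
    match ks, ih with
    | [], _ =>
      simp [expRef, PySem.List.pyGetD_neg_one (xs := [a]) (d := ((0:Int),(0:Int)))
        (by simp)]
    | b :: ks, ih =>
      have hrec := ih (by simp)
      have hlast : PySem.List.pyGetD (a :: b :: ks) (-1) ((0 : Int), (0 : Int))
          = PySem.List.pyGetD (b :: ks) (-1) ((0 : Int), (0 : Int)) := by
        rw [PySem.List.pyGetD_neg_one _ _ (by simp),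
          PySem.List.pyGetD_neg_one _ _ (by simp)]
        simp [List.getLast_cons]
      rw [expRef, ← hrec, hlast]
      simp only [List.tail_cons, List.zip_cons_cons, List.foldl_cons]
      rw [PySem.List.foldl_append_eq_flatMap
        (g := fun ab : (Int × Int) × (Int × Int) =>
          List.replicate (ab.2.1 - ab.1.1).toNat ab.1.2),
        PySem.List.foldl_append_eq_flatMap
        (g := fun ab : (Int × Int) × (Int × Int) =>
          List.replicate (ab.2.1 - ab.1.1).toNat ab.1.2)]
      simp

-- B computes the reference spine
theorem rsB (th p : Int) (rest : List Int) :
    remove_spikes_alt (p :: rest) th = p :: rsRef th p rest := by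
  unfold remove_spikes_alt
  simp only
  rw [PySem.List.enumerate_cons]
  simp only [List.foldl_cons]
  rw [if_neg (by simp)]
  rw [kpB_fold th (PySem.List.enumerate rest (0 + 1)) [((0 : Int), p)] ((0 : Int), p)
      (fun q hq => by
        rcases (PySem.List.mem_enumerate_iff _ _ _).1 hq with ⟨k, hk, rfl⟩
        simp; omega)
      (by simp) (by simp)]
  rw [List.singleton_append]
  rw [exp_zip (PySem.List.len (p :: rest)) _ (by simp)]
  have := exp_kp th rest 1 0 p (PySem.List.len (p :: rest)) (by omega)
    (by simp [PySem.List.len_eq]; omega)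
  simp only [show (0 : Int) + 1 = 1 by norm_num]
  rw [this]
  simp

-- ===== VERDICT =====
theorem remove_spikes_spec : Claim_equal_remove_spikes := by
  intro data threshold _
  unfold Spec_remove_spikes
  match data with
  | [] => rfl
  | p :: rest => rw [rsA, rsB]
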